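-- pv_equiv track=rewrite | github.com/delaanthonio/hackerrank | algorithm/search/cut_the_tree/brute.py | dfs
-- ===== SOURCE A (Python) =====
-- def dfs(graph, weights, seen, start) -> int:
--     queue = [start]
--     cost = 0
--     while queue:
--         node = queue.pop()
--         cost += weights[node]
--         for n in graph[node]:
--             if n in seen:
--                 continue
--             seen.add(n)
--             queue.append(n)
--     return cost
-- ===== SOURCE B (Python) =====
-- def dfs(graph, weights, seen, start) -> int:
--     cost = weights[start]
--     for n in graph[start]:
--         if n not in seen:
--             seen.add(n)
--             cost += dfs(graph, weights, seen, n)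
--     return cost
-- ===== Notes on version B (the rewrite author's own statement) =====
-- stated objective: simpler
-- what changed: The explicit-stack while loop with a queue list is replaced by a plain recursive DFS on the call stack (same marking rule: a node is added to seen when discovered as a neighbour, the start node itself is not pre-marked); the traversal order differs but the multiset of visited nodes, and hence the weight sum, is the same. Pre_ excludes exactly the inputs on which A raises KeyError: start, or some node reachable from start outside seen, missing from weights or graph.
import Mathlib
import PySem

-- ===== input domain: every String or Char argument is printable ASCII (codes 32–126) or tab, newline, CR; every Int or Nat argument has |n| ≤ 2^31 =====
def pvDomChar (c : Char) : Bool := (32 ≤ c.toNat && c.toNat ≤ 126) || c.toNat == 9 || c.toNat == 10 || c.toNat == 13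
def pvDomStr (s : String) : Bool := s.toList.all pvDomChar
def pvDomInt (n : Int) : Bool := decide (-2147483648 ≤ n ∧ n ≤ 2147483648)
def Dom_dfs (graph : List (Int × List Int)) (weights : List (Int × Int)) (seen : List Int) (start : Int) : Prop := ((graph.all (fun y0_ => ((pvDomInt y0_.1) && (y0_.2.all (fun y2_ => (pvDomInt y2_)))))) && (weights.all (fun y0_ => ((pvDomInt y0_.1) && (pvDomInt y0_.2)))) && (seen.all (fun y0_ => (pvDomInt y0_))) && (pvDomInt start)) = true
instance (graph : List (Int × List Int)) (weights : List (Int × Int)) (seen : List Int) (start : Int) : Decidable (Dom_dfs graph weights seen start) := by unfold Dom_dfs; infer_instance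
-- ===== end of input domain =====

-- B replaces A's explicit-stack while loop by a plain recursive DFS (same marking rule,
-- different traversal order, same visited multiset); objective: simpler. Both A and B mutate
-- `seen` in place (they add the same set of nodes); the equivalence proved here is about the
-- return value only.


-- ===== PORT A =====
-- graph[node] / weights[node]: dict lookup, totalised with getD; Pre_dfs excludes the
-- inputs on which the Python raises KeyError, so the default is never reached under Pre_.
def dfsAdj (graph : List (Int × List Int)) (node : Int) : List Int :=
  PySem.Dict.getD (PySem.Dict.mk graph) node []

def dfsW (weights : List (Int × Int)) (node : Int) : Int :=
  PySem.Dict.getD (PySem.Dict.mk weights) node 0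

-- all values that can ever be pushed (neighbour lists), used only as a fuel bound
def pvU (graph : List (Int × List Int)) : List Int := (graph.map Prod.snd).flatten

-- the while loop; returns (cost, final seen); fuel is a totality guard only
def dfsLoop (graph : List (Int × List Int)) (weights : List (Int × Int)) :
    Nat → List Int → List Int → Int × List Int
  | 0, _, seen => (0, seen)
  | fuel + 1, queue, seen =>
    match PySem.List.pop? queue with
    | none => (0, seen)
    | some (node, rest) =>
      let sq := (dfsAdj graph node).foldl
        (fun (sq : List Int × List Int) n =>
          if n ∈ sq.1 then sq else (PySem.Set.add sq.1 n, sq.2 ++ [n])) (seen, rest)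
      let r := dfsLoop graph weights fuel sq.2 sq.1
      (dfsW weights node + r.1, r.2)

def dfs (graph : List (Int × List Int)) (weights : List (Int × Int)) (seen : List Int) (start : Int) : Int :=
  (dfsLoop graph weights ((pvU graph).length + 2) [start] seen).1

-- ===== PORT B =====
-- recursive DFS; dfsVisit = one call of Source B's dfs, dfsNbrs = its for loop over graph[start],
-- threading (cost so far, seen); fuel is a totality guard only
mutual
def dfsVisit (graph : List (Int × List Int)) (weights : List (Int × Int)) :
    Nat → List Int → Int → Int × List Int
  | 0, seen, _ => (0, seen)
  | fuel + 1, seen, start =>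
    let r := dfsNbrs graph weights fuel seen (dfsAdj graph start)
    (dfsW weights start + r.1, r.2)
  termination_by fuel _ _ => (fuel, 0, 0)

def dfsNbrs (graph : List (Int × List Int)) (weights : List (Int × Int)) :
    Nat → List Int → List Int → Int × List Int
  | _, seen, [] => (0, seen)
  | fuel, seen, n :: rest =>
    if n ∈ seen then dfsNbrs graph weights fuel seen rest
    else
      let r1 := dfsVisit graph weights fuel (PySem.Set.add seen n) n
      let r2 := dfsNbrs graph weights fuel r1.2 rest
      (r1.1 + r2.1, r2.2)
  termination_by fuel _ ns => (fuel, 1, ns.length)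
end

def dfs_alt (graph : List (Int × List Int)) (weights : List (Int × Int)) (seen : List Int) (start : Int) : Int :=
  (dfsVisit graph weights ((pvU graph).length + 1) seen start).1

-- ===== PRECONDITION & SPEC =====
-- pvReach computes the set of nodes A ever discovers and queues besides start: the closure,
-- under the adjacency relation, of start's unseen neighbours (Kleene iteration of a monotone
-- step; it stabilises within |pvU graph| steps since every discovered node is some neighbour).
def pvReachStep (graph : List (Int × List Int)) (seen : List Int) (start : Int)
    (S : List Int) : List Int :=
  S ++ (pvU graph).filter (fun n =>
    !(seen.contains n) && !(S.contains n) && (start :: S).any (fun x => (dfsAdj graph x).contains n))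

def pvReachIter (graph : List (Int × List Int)) (seen : List Int) (start : Int) :
    Nat → List Int
  | 0 => []
  | k + 1 => pvReachStep graph seen start (pvReachIter graph seen start k)

def pvReach (graph : List (Int × List Int)) (seen : List Int) (start : Int) : List Int :=
  pvReachIter graph seen start ((pvU graph).length + 1)

-- Python A raises KeyError exactly when one of the nodes it visits — start, or a node
-- reachable from start that is not in the initial seen — is missing from weights or graph;
-- Pre_dfs excludes exactly those inputs (B raises on the same inputs; it visits the same nodes).
def Pre_dfs (graph : List (Int × List Int)) (weights : List (Int × Int)) (seen : List Int) (start : Int) : Prop :=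
  (PySem.Dict.mk weights).contains start = true ∧ (PySem.Dict.mk graph).contains start = true ∧
  ∀ m ∈ pvReach graph seen start,
    (PySem.Dict.mk weights).contains m = true ∧ (PySem.Dict.mk graph).contains m = true
instance (graph : List (Int × List Int)) (weights : List (Int × Int)) (seen : List Int) (start : Int) : Decidable (Pre_dfs graph weights seen start) := by unfold Pre_dfs; infer_instance

def pvWitness_dfs : (List (Int × List Int)) × (List (Int × Int)) × List Int × Int :=
  ([(0, [1]), (1, [0])], [(0, 5), (1, 7)], [], 0)

def Spec_dfs (graph : List (Int × List Int)) (weights : List (Int × Int)) (seen : List Int) (start : Int) (out : Int) : Prop := out = dfs_alt graph weights seen start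
instance (graph : List (Int × List Int)) (weights : List (Int × Int)) (seen : List Int) (start : Int) (out : Int) : Decidable (Spec_dfs graph weights seen start out) := by unfold Spec_dfs; infer_instance

-- ===== CLAIM (what is proved, stated in full; the proofs are below) =====
def Claim_equal_dfs : Prop := ∀ (graph : List (Int × List Int)) (weights : List (Int × Int)) (seen : List Int) (start : Int), Dom_dfs graph weights seen start → Pre_dfs graph weights seen start → Spec_dfs graph weights seen start (dfs graph weights seen start)

-- ===== LEMMAS AND PROOFS =====

-- the set of nodes a run started with `seen` marked and worklist `roots` eventually adds to
-- seen: least set of non-seen nodes reachable from roots (roots are candidate neighbours)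
inductive ClR (adj : Int → List Int) (seen roots : List Int) : Int → Prop
  | base {n : Int} : n ∈ roots → n ∉ seen → ClR adj seen roots n
  | step {x n : Int} : ClR adj seen roots x → n ∈ adj x → n ∉ seen → ClR adj seen roots n

theorem ClR_not_seen {adj : Int → List Int} {seen roots : List Int} {m : Int}
    (h : ClR adj seen roots m) : m ∉ seen := by
  cases h with
  | base _ hs => exact hs
  | step _ _ hs => exact hs

theorem ClR_nil_roots {adj : Int → List Int} {seen : List Int} {m : Int}
    (h : ClR adj seen [] m) : False := by
  induction h with
  | base hm _ => simp at hm
  | step _ _ _ ih => exact ih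

theorem ClR_mono_roots {adj : Int → List Int} {seen r1 r2 : List Int} {m : Int}
    (hr : ∀ x, x ∈ r1 → x ∈ r2) (h : ClR adj seen r1 m) : ClR adj seen r2 m := by
  induction h with
  | base hm hs => exact .base (hr _ hm) hs
  | step _ ha hs ih => exact .step ih ha hs

theorem ClR_anti_seen {adj : Int → List Int} {s1 s2 roots : List Int} {m : Int}
    (hs : ∀ x, x ∈ s1 → x ∈ s2) (h : ClR adj s2 roots m) : ClR adj s1 roots m := by
  induction h with
  | base hm hns => exact .base hm (fun hc => hns (hs _ hc))
  | step _ ha hns ih => exact .step ih ha (fun hc => hns (hs _ hc))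

theorem ClR_trans_root {adj : Int → List Int} {seen roots : List Int} {x m : Int}
    (hx : ClR adj seen roots x) (h : ClR adj seen (adj x) m) : ClR adj seen roots m := by
  induction h with
  | base hm hs => exact .step hx hm hs
  | step _ ha hs ih => exact .step ih ha hs

theorem ClR_skip {adj : Int → List Int} {seen rest : List Int} {n m : Int}
    (hn : n ∈ seen) : ClR adj seen (n :: rest) m ↔ ClR adj seen rest m := by
  constructor
  · intro h
    induction h with
    | base hm hs =>
      rcases List.mem_cons.mp hm with rfl | hm
      · exact absurd hn hs
      · exact .base hm hs
    | step _ ha hs ih => exact .step ih ha hs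
  · exact ClR_mono_roots (fun x hx => List.mem_cons_of_mem _ hx)

-- B's step decomposition: visiting n first splits the closure into n, n's subtree,
-- and the rest computed with n's subtree already marked
theorem clB_decomp {adj : Int → List Int} {seen rest added1 : List Int} {n : Int}
    (hn : n ∉ seen) (h1 : ∀ m, m ∈ added1 ↔ ClR adj (seen ++ [n]) (adj n) m) (m : Int) :
    ClR adj seen (n :: rest) m ↔
      (m = n ∨ m ∈ added1 ∨ ClR adj (seen ++ [n] ++ added1) rest m) := by
  constructor
  · intro h
    induction h with
    | @base m hm hs =>
      by_cases hmn : m = n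
      · exact Or.inl hmn
      · by_cases hm1 : m ∈ added1
        · exact Or.inr (Or.inl hm1)
        · refine Or.inr (Or.inr (ClR.base ?_ ?_))
          · rcases List.mem_cons.mp hm with rfl | hm
            · exact absurd rfl hmn
            · exact hm
          · intro hc
            rcases List.mem_append.mp hc with hc | hc
            · rcases List.mem_append.mp hc with hc | hc
              · exact hs hc
              · simp at hc; exact hmn hc
            · exact hm1 hc
    | @step x m hx ha hs ih =>
      by_cases hmn : m = n
      · exact Or.inl hmn
      · by_cases hm1 : m ∈ added1
        · exact Or.inr (Or.inl hm1)
        · have hms : m ∉ seen ++ [n] := by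
            intro hc
            rcases List.mem_append.mp hc with hc | hc
            · exact hs hc
            · simp at hc; exact hmn hc
          rcases ih with rfl | hx1 | hx2
          · -- x = n : m is in n's subtree, hence in added1 — contradiction
            exact absurd ((h1 m).mpr (ClR.base ha hms)) hm1
          · exact absurd ((h1 m).mpr (ClR.step ((h1 x).mp hx1) ha hms)) hm1
          · refine Or.inr (Or.inr (ClR.step hx2 ha ?_))
            intro hc
            rcases List.mem_append.mp hc with hc | hc
            · exact hms hc
            · exact hm1 hc
  · rintro (rfl | hm1 | h2)
    · exact ClR.base (by simp) hn
    · have := (h1 m).mp hm1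
      have h' : ClR adj seen (adj n) m :=
        ClR_anti_seen (fun x hx => List.mem_append_left _ hx) this
      exact ClR_trans_root (ClR.base (by simp) hn) h'
    · induction h2 with
      | @base m hm hs =>
        exact ClR.base (List.mem_cons_of_mem _ hm)
          (fun hc => hs (List.mem_append_left _ (List.mem_append_left _ hc)))
      | @step x m hx ha hs ih =>
        exact ClR.step ih ha
          (fun hc => hs (List.mem_append_left _ (List.mem_append_left _ hc)))

-- A's step decomposition: popping node marks all its unseen neighbours newN at once
theorem clA_decomp {adj : Int → List Int} {seen R newN : List Int} {node : Int}
    (hnew : ∀ m, m ∈ newN ↔ m ∈ adj node ∧ m ∉ seen) (m : Int) :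
    ClR adj seen (R ++ adj node) m ↔
      (m ∈ newN ∨ ClR adj (seen ++ newN) (R ++ newN.flatMap adj) m) := by
  constructor
  · intro h
    induction h with
    | @base m hm hs =>
      by_cases hmN : m ∈ newN
      · exact Or.inl hmN
      · rcases List.mem_append.mp hm with hm | hm
        · refine Or.inr (ClR.base (List.mem_append_left _ hm) ?_)
          intro hc
          rcases List.mem_append.mp hc with hc | hc
          · exact hs hc
          · exact hmN hc
        · exact absurd ((hnew m).mpr ⟨hm, hs⟩) hmN
    | @step x m hx ha hs ih =>
      by_cases hmN : m ∈ newN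
      · exact Or.inl hmN
      · have hms : m ∉ seen ++ newN := by
          intro hc
          rcases List.mem_append.mp hc with hc | hc
          · exact hs hc
          · exact hmN hc
        rcases ih with hx1 | hx2
        · refine Or.inr (ClR.base ?_ hms)
          exact List.mem_append_right _ (List.mem_flatMap.mpr ⟨x, hx1, ha⟩)
        · exact Or.inr (ClR.step hx2 ha hms)
  · rintro (hmN | h2)
    · exact ClR.base (List.mem_append_right _ ((hnew m).mp hmN).1) ((hnew m).mp hmN).2
    · induction h2 with
      | @base m hm hs =>
        have hs' : m ∉ seen := fun hc => hs (List.mem_append_left _ hc)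
        rcases List.mem_append.mp hm with hm | hm
        · exact ClR.base (List.mem_append_left _ hm) hs'
        · rcases List.mem_flatMap.mp hm with ⟨a, haN, hma⟩
          have ha' : ClR adj seen (R ++ adj node) a :=
            ClR.base (List.mem_append_right _ ((hnew a).mp haN).1) ((hnew a).mp haN).2
          exact ClR.step ha' hma hs'
      | @step x m hx ha hs ih =>
        exact ClR.step ih ha (fun hc => hs (List.mem_append_left _ hc))

-- ---- counting lemmas for the fuel bounds ----
def flen (U seen : List Int) : Nat := (U.filter (fun x => decide (x ∉ seen))).length

theorem flen_anti {U s1 s2 : List Int} (h : ∀ x, x ∈ s1 → x ∈ s2) :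
    flen U s2 ≤ flen U s1 := by
  unfold flen
  induction U with
  | nil => simp
  | cons u U ih =>
    by_cases h1 : u ∈ s1
    · rw [List.filter_cons_of_neg (by simp [h _ h1]),
          List.filter_cons_of_neg (by simp [h1])]
      exact ih
    · by_cases h2 : u ∈ s2
      · rw [List.filter_cons_of_neg (by simp [h2]), List.filter_cons_of_pos (by simp [h1])]
        simp only [List.length_cons]
        omega
      · rw [List.filter_cons_of_pos (by simp [h2]), List.filter_cons_of_pos (by simp [h1])]
        simp only [List.length_cons]
        omega

theorem flen_add_lt {U seen : List Int} {n : Int} (hU : n ∈ U) (hs : n ∉ seen) :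
    flen U (seen ++ [n]) < flen U seen := by
  unfold flen
  induction U with
  | nil => simp at hU
  | cons u U ih =>
    rcases List.mem_cons.mp hU with rfl | hu
    · rw [List.filter_cons_of_neg (by simp), List.filter_cons_of_pos (by simp [hs])]
      have := flen_anti (U := U) (s1 := seen) (s2 := seen ++ [n])
        (fun x hx => List.mem_append_left _ hx)
      unfold flen at this
      simp only [List.length_cons]
      omega
    · have := ih hu
      by_cases h1 : u ∈ seen
      · rw [List.filter_cons_of_neg (by simp [h1]), List.filter_cons_of_neg (by simp [h1])]
        exact this
      · by_cases h2 : u = n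
        · subst h2
          rw [List.filter_cons_of_neg (by simp), List.filter_cons_of_pos (by simp [h1])]
          simp only [List.length_cons]
          omega
        · rw [List.filter_cons_of_pos (by simp [h1, h2]),
              List.filter_cons_of_pos (by simp [h1])]
          simp only [List.length_cons]
          omega

theorem flen_append_new {U : List Int} : ∀ (E seen : List Int), E.Nodup →
    (∀ e ∈ E, e ∈ U ∧ e ∉ seen) → flen U (seen ++ E) + E.length ≤ flen U seen := by
  intro E
  induction E with
  | nil => intro seen _ _; simp
  | cons e E ih =>
    intro seen hnd he
    have h1 : flen U (seen ++ [e]) < flen U seen :=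
      flen_add_lt (he e (by simp)).1 (he e (by simp)).2
    have h2 : flen U ((seen ++ [e]) ++ E) + E.length ≤ flen U (seen ++ [e]) := by
      apply ih (seen ++ [e]) (List.nodup_cons.mp hnd).2
      intro x hx
      refine ⟨(he x (by simp [hx])).1, ?_⟩
      intro hc
      rcases List.mem_append.mp hc with hc | hc
      · exact (he x (by simp [hx])).2 hc
      · simp at hc
        subst hc
        exact (List.nodup_cons.mp hnd).1 hx
    have e3 : seen ++ e :: E = (seen ++ [e]) ++ E := by simp
    rw [e3]
    simp only [List.length_cons]
    omega

theorem flen_le_len (U seen : List Int) : flen U seen ≤ U.length :=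
  List.length_filter_le _ _

theorem adjSub {graph : List (Int × List Int)} {x n : Int}
    (h : n ∈ dfsAdj graph x) : n ∈ pvU graph := by
  unfold dfsAdj PySem.Dict.getD at h
  unfold pvU
  induction graph with
  | nil => simp [PySem.Dict.get?] at h
  | cons p graph ih =>
    rw [show PySem.Dict.mk (p :: graph) = { items := (p.1, p.2) :: graph } from rfl,
        PySem.Dict.get?_mk_cons] at h
    by_cases hk : (p.1 == x) = true
    · simp only [hk, if_pos] at h
      simp only [Option.getD_some] at h
      simp [h]
    · simp only [hk, if_neg, Bool.false_eq_true, not_false_iff] at h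
      have := ih h
      simp only [List.map_cons, List.flatten_cons, List.mem_append]
      exact Or.inr this

-- ---- A's inner for loop ----
def seqNew : List Int → List Int → List Int
  | _, [] => []
  | seen, n :: rest => if n ∈ seen then seqNew seen rest else n :: seqNew (seen ++ [n]) rest

theorem mem_seqNew : ∀ (ns seen : List Int) (m : Int),
    m ∈ seqNew seen ns ↔ m ∈ ns ∧ m ∉ seen := by
  intro ns
  induction ns with
  | nil => intro seen m; simp [seqNew]
  | cons n rest ih =>
    intro seen m
    by_cases hn : n ∈ seen
    · rw [seqNew, if_pos hn, ih]
      constructor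
      · rintro ⟨h1, h2⟩; exact ⟨List.mem_cons_of_mem _ h1, h2⟩
      · rintro ⟨h1, h2⟩
        rcases List.mem_cons.mp h1 with rfl | h1
        · exact absurd hn h2
        · exact ⟨h1, h2⟩
    · rw [seqNew, if_neg hn]
      by_cases hm : m = n
      · subst hm; simp [hn]
      · rw [List.mem_cons, ih]
        constructor
        · rintro (rfl | ⟨h1, h2⟩)
          · exact absurd rfl hm
          · refine ⟨List.mem_cons_of_mem _ h1, fun hc => h2 (List.mem_append_left _ hc)⟩
        · rintro ⟨h1, h2⟩
          rcases List.mem_cons.mp h1 with rfl | h1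
          · exact absurd rfl hm
          · refine Or.inr ⟨h1, fun hc => ?_⟩
            rcases List.mem_append.mp hc with hc | hc
            · exact h2 hc
            · simp at hc; exact hm hc

theorem nodup_seqNew : ∀ (ns seen : List Int), (seqNew seen ns).Nodup := by
  intro ns
  induction ns with
  | nil => intro seen; simp [seqNew]
  | cons n rest ih =>
    intro seen
    by_cases hn : n ∈ seen
    · rw [seqNew, if_pos hn]; exact ih seen
    · rw [seqNew, if_neg hn]
      refine List.nodup_cons.mpr ⟨fun hc => ?_, ih _⟩
      exact ((mem_seqNew _ _ _).mp hc).2 (List.mem_append_right _ (by simp))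

theorem foldA_eq : ∀ (ns seen q : List Int),
    ns.foldl (fun (sq : List Int × List Int) n =>
      if n ∈ sq.1 then sq else (PySem.Set.add sq.1 n, sq.2 ++ [n])) (seen, q)
    = (seen ++ seqNew seen ns, q ++ seqNew seen ns) := by
  intro ns
  induction ns with
  | nil => intro seen q; simp [seqNew]
  | cons n rest ih =>
    intro seen q
    by_cases hn : n ∈ seen
    · rw [List.foldl_cons]
      simp only [if_pos hn]
      rw [ih, seqNew, if_pos hn]
    · rw [List.foldl_cons]
      simp only [if_neg hn]
      rw [show PySem.Set.add seen n = seen ++ [n] by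
            simp [PySem.Set.add, hn],
          ih, seqNew, if_neg hn]
      simp

-- ---- characterization of port A ----
theorem loopA_spec (graph : List (Int × List Int)) (weights : List (Int × Int)) :
    ∀ (fuel : Nat) (queue seen : List Int),
    flen (pvU graph) seen + queue.length < fuel →
    ∃ added : List Int,
      dfsLoop graph weights fuel queue seen
        = ((queue.map (dfsW weights)).sum + (added.map (dfsW weights)).sum, seen ++ added)
      ∧ added.Nodup
      ∧ ∀ m, m ∈ added ↔ ClR (dfsAdj graph) seen (queue.flatMap (dfsAdj graph)) m := by
  intro fuel
  induction fuel with
  | zero => intro queue seen h; omega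
  | succ fuel ih =>
    intro queue seen h
    rcases List.eq_nil_or_concat queue with rfl | ⟨rest, node, rfl⟩
    · refine ⟨[], ?_, by simp, ?_⟩
      · simp [dfsLoop, PySem.List.pop?, PySem.List.pyIdx?]
      · intro m
        simp only [List.flatMap_nil, List.not_mem_nil, false_iff]
        exact fun hc => ClR_nil_roots hc
    · rw [List.concat_eq_append] at *
      have hlen : (rest ++ [node]).length = rest.length + 1 := by simp
      simp only [dfsLoop, PySem.List.pop?_last]
      rw [foldA_eq (dfsAdj graph node) seen rest]
      have hmem : ∀ m, m ∈ seqNew seen (dfsAdj graph node) ↔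
          m ∈ dfsAdj graph node ∧ m ∉ seen := fun m => mem_seqNew _ _ _
      set newN := seqNew seen (dfsAdj graph node) with hnewN
      have hndN : newN.Nodup := nodup_seqNew _ _
      have hcount : flen (pvU graph) (seen ++ newN) + newN.length ≤ flen (pvU graph) seen :=
        flen_append_new newN seen hndN
          (fun e he => ⟨adjSub ((hmem e).mp he).1, ((hmem e).mp he).2⟩)
      have hcond : flen (pvU graph) (seen ++ newN) + (rest ++ newN).length < fuel := by
        rw [hlen] at h
        simp only [List.length_append]
        omega
      obtain ⟨added, heq, hnd', hmem'⟩ := ih (rest ++ newN) (seen ++ newN) hcond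
      refine ⟨newN ++ added, ?_, ?_, ?_⟩
      · rw [heq]
        simp only [Prod.mk.injEq, List.map_append, List.sum_append]
        constructor
        · simp only [List.map_cons, List.map_nil, List.sum_cons, List.sum_nil]
          omega
        · simp
      · rw [List.nodup_append]
        refine ⟨hndN, hnd', fun m hm b hb => ?_⟩
        intro heq
        subst heq
        exact ClR_not_seen ((hmem' m).mp hb) (List.mem_append_right _ hm)
      · intro m
        have hdec := clA_decomp (adj := dfsAdj graph) (seen := seen)
          (R := rest.flatMap (dfsAdj graph)) (newN := newN) (node := node) hmem m
        have hroots : (rest ++ [node]).flatMap (dfsAdj graph)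
            = rest.flatMap (dfsAdj graph) ++ dfsAdj graph node := by simp
        have hroots' : (rest ++ newN).flatMap (dfsAdj graph)
            = rest.flatMap (dfsAdj graph) ++ newN.flatMap (dfsAdj graph) := by simp
        rw [hroots, List.mem_append, hmem' m, hroots', hdec]

-- ---- characterization of port B ----
def visitSpec (graph : List (Int × List Int)) (weights : List (Int × Int)) (fuel : Nat) : Prop :=
  ∀ (seen : List Int) (start : Int), flen (pvU graph) seen < fuel →
    ∃ added : List Int,
      dfsVisit graph weights fuel seen start
        = (dfsW weights start + (added.map (dfsW weights)).sum, seen ++ added)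
      ∧ added.Nodup
      ∧ ∀ m, m ∈ added ↔ ClR (dfsAdj graph) seen (dfsAdj graph start) m

theorem nbrs_of_visit (graph : List (Int × List Int)) (weights : List (Int × Int)) (fuel : Nat)
    (hv : visitSpec graph weights fuel) :
    ∀ (ns seen : List Int), (∀ n ∈ ns, n ∈ pvU graph) → flen (pvU graph) seen ≤ fuel →
    ∃ added : List Int,
      dfsNbrs graph weights fuel seen ns
        = ((added.map (dfsW weights)).sum, seen ++ added)
      ∧ added.Nodup
      ∧ ∀ m, m ∈ added ↔ ClR (dfsAdj graph) seen ns m := by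
  intro ns
  induction ns with
  | nil =>
    intro seen _ _
    refine ⟨[], by simp [dfsNbrs], by simp, fun m => ?_⟩
    simp only [List.not_mem_nil, false_iff]
    exact fun hc => ClR_nil_roots hc
  | cons n rest ihn =>
    intro seen hsub hf
    by_cases hn : n ∈ seen
    · obtain ⟨added, heq, hnd, hmem⟩ := ihn seen (fun x hx => hsub x (by simp [hx])) hf
      refine ⟨added, ?_, hnd, fun m => ?_⟩
      · rw [dfsNbrs, if_pos hn]
        exact heq
      · rw [hmem m, ClR_skip hn]
    · have hadd : PySem.Set.add seen n = seen ++ [n] := by simp [PySem.Set.add, hn]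
      have hnU : n ∈ pvU graph := hsub n (by simp)
      have hf1 : flen (pvU graph) (seen ++ [n]) < fuel :=
        lt_of_lt_of_le (flen_add_lt hnU hn) hf
      obtain ⟨added1, heq1, hnd1, hmem1⟩ := hv (seen ++ [n]) n hf1
      have hf2 : flen (pvU graph) ((seen ++ [n]) ++ added1) ≤ fuel := by
        have := flen_anti (U := pvU graph) (s1 := seen ++ [n]) (s2 := (seen ++ [n]) ++ added1)
          (fun x hx => List.mem_append_left _ hx)
        omega
      obtain ⟨added2, heq2, hnd2, hmem2⟩ :=
        ihn ((seen ++ [n]) ++ added1) (fun x hx => hsub x (by simp [hx])) hf2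
      refine ⟨n :: (added1 ++ added2), ?_, ?_, fun m => ?_⟩
      · rw [dfsNbrs, if_neg hn, hadd, heq1]
        simp only [heq2, Prod.mk.injEq]
        constructor
        · simp only [List.map_cons, List.map_append, List.sum_cons, List.sum_append]
          omega
        · simp
      · rw [List.nodup_cons, List.nodup_append]
        refine ⟨?_, hnd1, hnd2, fun m hm b hb => ?_⟩
        · intro hc
          rcases List.mem_append.mp hc with hc | hc
          · exact ClR_not_seen ((hmem1 n).mp hc) (List.mem_append_right _ (by simp))
          · exact ClR_not_seen ((hmem2 n).mp hc)
              (List.mem_append_left _ (List.mem_append_right _ (by simp)))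
        · intro heq
          subst heq
          exact ClR_not_seen ((hmem2 m).mp hb) (List.mem_append_right _ hm)
      · have hdec := clB_decomp (adj := dfsAdj graph) (seen := seen) (rest := rest)
          (added1 := added1) (n := n) hn hmem1 m
        rw [show seen ++ [n] ++ added1 = (seen ++ [n]) ++ added1 from rfl] at hdec
        rw [hdec, List.mem_cons, List.mem_append, hmem2 m]

theorem visit_spec (graph : List (Int × List Int)) (weights : List (Int × Int)) :
    ∀ fuel : Nat, visitSpec graph weights fuel := by
  intro fuel
  induction fuel with
  | zero => intro seen start h; omega
  | succ fuel ih =>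
    intro seen start h
    obtain ⟨added, heq, hnd, hmem⟩ := nbrs_of_visit graph weights fuel ih
      (dfsAdj graph start) seen (fun x hx => adjSub hx) (by omega)
    refine ⟨added, ?_, hnd, hmem⟩
    rw [dfsVisit, heq]

-- ===== VERDICT (by name: the statement is the Claim_ definition above) =====
theorem dfs_spec : Claim_equal_dfs := by
  intro graph weights seen start _dom _pre
  unfold Spec_dfs dfs dfs_alt
  obtain ⟨addedA, heqA, hndA, hmemA⟩ :=
    loopA_spec graph weights ((pvU graph).length + 2) [start] seen
      (by have := flen_le_len (pvU graph) seen; simp only [List.length_cons, List.length_nil]; omega)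
  obtain ⟨addedB, heqB, hndB, hmemB⟩ :=
    visit_spec graph weights ((pvU graph).length + 1) seen start
      (by have := flen_le_len (pvU graph) seen; omega)
  rw [heqA, heqB]
  have hperm : addedA.Perm addedB := by
    refine (List.perm_ext_iff_of_nodup hndA hndB).mpr (fun m => ?_)
    rw [hmemA m, hmemB m,
        show ([start].flatMap (dfsAdj graph)) = dfsAdj graph start by simp]
  have hsum := (hperm.map (dfsW weights)).sum_eq
  simp only [List.map_cons, List.map_nil, List.sum_cons, List.sum_nil]
  omega
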